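-- pv_equiv track=rewrite | github.com/davidiach/erdos97 | data/runs/2026-05-06/bridge_lemma_attack_test.py | is_ear_orderable
-- ===== SOURCE A (Python) =====
-- def rows_to_masks(rows):
--     return [sum(1 << v for v in row) for row in rows]
--
-- def is_ear_orderable(rows, threshold=3):
--     n = len(rows)
--     masks = rows_to_masks(rows)
--     full = (1 << n) - 1
--     memo = {}
--
--     def can_peel(sm):
--         if sm in memo:
--             return memo[sm]
--         sz = bin(sm).count("1")
--         if sz <= threshold:
--             memo[sm] = True
--             return True
--         for c in range(n):
--             if not ((sm >> c) & 1):
--                 continue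
--             if bin(masks[c] & sm).count("1") >= threshold:
--                 if can_peel(sm & ~(1 << c)):
--                     memo[sm] = True
--                     return True
--         memo[sm] = False
--         return False
--
--     return can_peel(full)
-- ===== SOURCE B (Python) =====
-- def is_ear_orderable(rows, threshold=3):
--     # Iterative depth-first search over the peeling state graph: a state is the
--     # mask of remaining vertices; from sm we may move to sm & ~(1 << c) whenever
--     # vertex c is present with degree >= threshold inside sm; answer is whether
--     # some state of size <= threshold is reachable from the full mask.
--     n = len(rows)
--     masks = [sum(1 << v for v in row) for row in rows]
--     full = (1 << n) - 1
--     stack = [full]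
--     seen = {full}
--     while stack:
--         sm = stack.pop()
--         if bin(sm).count("1") <= threshold:
--             return True
--         for c in range(n):
--             if (sm >> c) & 1:
--                 if bin(masks[c] & sm).count("1") >= threshold:
--                     nxt = sm & ~(1 << c)
--                     if nxt not in seen:
--                         seen.add(nxt)
--                         stack.append(nxt)
--     return False
-- ===== Notes on version B (the rewrite author's own statement) =====
-- stated objective: alternative
-- what changed: B replaces A's memoized top-down recursion over vertex-set masks by an explicit-stack reachability search with a visited set over the same peeling state graph (a state of size <= threshold is reachable iff A's recursion succeeds).
import Mathlib
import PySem

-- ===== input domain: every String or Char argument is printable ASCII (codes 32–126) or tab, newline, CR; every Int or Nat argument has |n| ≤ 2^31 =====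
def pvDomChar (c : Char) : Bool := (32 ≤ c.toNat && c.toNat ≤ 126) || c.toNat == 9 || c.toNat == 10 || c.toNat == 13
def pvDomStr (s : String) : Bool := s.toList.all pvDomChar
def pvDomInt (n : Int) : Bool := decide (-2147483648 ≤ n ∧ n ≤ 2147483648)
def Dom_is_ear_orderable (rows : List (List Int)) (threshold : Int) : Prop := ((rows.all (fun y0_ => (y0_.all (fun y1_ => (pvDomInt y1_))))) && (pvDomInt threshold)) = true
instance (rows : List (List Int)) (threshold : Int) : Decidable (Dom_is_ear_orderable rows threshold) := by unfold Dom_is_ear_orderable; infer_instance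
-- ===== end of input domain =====

-- B replaces A's memoized recursion by an explicit-stack reachability search with a
-- visited set (same asymptotic cost); equality of the return values is proved on all
-- inputs with only nonnegative vertex ids (Pre_), where Python returns at all.
--
-- Porting notes (both ports): all Python ints involved are nonnegative under Pre_
-- (Pre_ excludes negative vertex ids, on which Python's `1 << v` raises ValueError),
-- so masks are ported as Nat and `v` is read with `.toNat` (exact for 0 ≤ v);
-- `bin(x).count("1")` for x ≥ 0 is PySem.Int.bitCount; `sm & ~(1 << c)` is ported as
-- `sm ^^^ (1 <<< c)`, exact because both programs evaluate it only after testing that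
-- bit c of sm is set; `masks[c]` is `masks.getD c 0`, exact since c < len(masks).

-- ===== PORT A =====

-- bin(m).count("1") for m ≥ 0
def pvPop (m : Nat) : Nat := PySem.Int.bitCount (m : Int)

def rows_to_masks (rows : List (List Int)) : List Nat :=
  rows.map (fun row => row.foldl (fun acc v => acc + (1 <<< v.toNat)) 0)

-- `can_peel` with its memo dict.  `fuel` only makes the recursion structural: every
-- nested call strictly decreases sm, so the initial fuel full+1 is never exhausted
-- (lemma pvCanPeel_spec below).
mutual
def pvCanPeel (masks : List Nat) (n : Nat) (t : Int) (fuel : Nat) (sm : Nat)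
    (memo : PySem.Dict Nat Bool) : Bool × PySem.Dict Nat Bool :=
  match fuel with
  | 0 => (false, memo)
  | f + 1 =>
    match memo.get? sm with
    | some b => (b, memo)
    | none =>
      if (pvPop sm : Int) ≤ t then (true, memo.insert sm true)
      else pvPeelLoop masks n t f sm (List.range n) memo
termination_by (fuel, 0)

-- the `for c in range(n)` loop inside can_peel (cs = the remaining values of c)
def pvPeelLoop (masks : List Nat) (n : Nat) (t : Int) (f : Nat) (sm : Nat)
    (cs : List Nat) (memo : PySem.Dict Nat Bool) : Bool × PySem.Dict Nat Bool :=
  match cs with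
  | [] => (false, memo.insert sm false)
  | c :: cs' =>
    if ((sm >>> c) &&& 1) == 0 then pvPeelLoop masks n t f sm cs' memo
    else if t ≤ (pvPop ((masks.getD c 0) &&& sm) : Int) then
      let r := pvCanPeel masks n t f (sm ^^^ (1 <<< c)) memo
      if r.1 then (true, r.2.insert sm true) else pvPeelLoop masks n t f sm cs' r.2
    else pvPeelLoop masks n t f sm cs' memo
termination_by (f, cs.length + 1)
end

def is_ear_orderable (rows : List (List Int)) (threshold : Int) : Bool :=
  let n := rows.length
  let masks := rows_to_masks rows
  let full := (1 <<< n) - 1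
  (pvCanPeel masks n threshold (full + 1) full PySem.Dict.empty).1

-- ===== PORT B =====

-- body of B's `for c in range(n)` loop: p = (stack, seen)
def pvDfsStep (masks : List Nat) (t : Int) (sm : Nat)
    (p : List Nat × PySem.Set Nat) (c : Nat) : List Nat × PySem.Set Nat :=
  if ((sm >>> c) &&& 1) != 0 then
    if t ≤ (pvPop ((masks.getD c 0) &&& sm) : Int) then
      let nxt := sm ^^^ (1 <<< c)
      if nxt ∈ p.2 then p else (p.1 ++ [nxt], PySem.Set.add p.2 nxt)
    else p
  else p

-- B's `while stack:` loop.  `fuel` only makes the loop structural: each iteration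
-- pushes only fresh masks ≤ full, so the initial fuel full+2 is never exhausted
-- (lemma pvDfs_spec below).
def pvDfs (masks : List Nat) (n : Nat) (t : Int) (fuel : Nat)
    (stack : List Nat) (seen : PySem.Set Nat) : Bool :=
  match fuel with
  | 0 => false
  | f + 1 =>
    match PySem.List.pop? stack with      -- sm = stack.pop(); none = `while` exit
    | none => false
    | some (sm, rest) =>
      if (pvPop sm : Int) ≤ t then true
      else
        let p := (List.range n).foldl (pvDfsStep masks t sm) (rest, seen)
        pvDfs masks n t f p.1 p.2

def is_ear_orderable_alt (rows : List (List Int)) (threshold : Int) : Bool :=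
  let n := rows.length
  let masks := rows.map (fun row => row.foldl (fun acc v => acc + (1 <<< v.toNat)) 0)
  let full := (1 <<< n) - 1
  pvDfs masks n threshold (full + 2) [full] (PySem.Set.ofList [full])

-- ===== PRECONDITION & SPEC =====

-- Pre_ excludes exactly the inputs with a negative vertex id, on which Python's
-- `1 << v` raises ValueError (in A and in B alike).
def Pre_is_ear_orderable (rows : List (List Int)) (threshold : Int) : Prop :=
  ∀ row ∈ rows, ∀ v ∈ row, 0 ≤ v
instance (rows : List (List Int)) (threshold : Int) : Decidable (Pre_is_ear_orderable rows threshold) := by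
  unfold Pre_is_ear_orderable; infer_instance

def pvWitness_is_ear_orderable : List (List Int) × Int := ([[1, 2], [0, 2], [0, 1]], 3)

def Spec_is_ear_orderable (rows : List (List Int)) (threshold : Int) (out : Bool) : Prop := out = is_ear_orderable_alt rows threshold
instance (rows : List (List Int)) (threshold : Int) (out : Bool) : Decidable (Spec_is_ear_orderable rows threshold out) := by unfold Spec_is_ear_orderable; infer_instance

-- ===== CLAIM (what is proved, stated in full; the proofs are below) =====
def Claim_equal_is_ear_orderable : Prop := ∀ (rows : List (List Int)) (threshold : Int), Dom_is_ear_orderable rows threshold → Pre_is_ear_orderable rows threshold → Spec_is_ear_orderable rows threshold (is_ear_orderable rows threshold)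

-- ===== LEMMAS AND PROOFS =====

-- The peeling condition both programs test for vertex c in state sm
def pvCond (masks : List Nat) (t : Int) (sm c : Nat) : Bool :=
  (((sm >>> c) &&& 1) != 0) && (t ≤ (pvPop ((masks.getD c 0) &&& sm) : Int))

def pvSmallB (t : Int) (sm : Nat) : Bool := (pvPop sm : Int) ≤ t

-- the pure (memo-free, fuelled) peeling predicate both programs decide
def pvPeel (masks : List Nat) (n : Nat) (t : Int) : Nat → Nat → Bool
  | 0, _ => false
  | f + 1, sm =>
    if pvSmallB t sm then true
    else (List.range n).any fun c => pvCond masks t sm c && pvPeel masks n t f (sm ^^^ (1 <<< c))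

def pvPeelN (masks : List Nat) (n : Nat) (t : Int) (sm : Nat) : Bool :=
  pvPeel masks n t (sm + 1) sm

-- one peeling move, and reachability in the state graph
def pvStep (masks : List Nat) (n : Nat) (t : Int) (a b : Nat) : Prop :=
  ∃ c, c < n ∧ pvCond masks t a c = true ∧ b = a ^^^ (1 <<< c)

def pvReach (masks : List Nat) (n : Nat) (t : Int) : Nat → Nat → Prop :=
  Relation.ReflTransGen (pvStep masks n t)

lemma pvCond_bit (masks : List Nat) (t : Int) (sm c : Nat) (h : pvCond masks t sm c = true) :
    Nat.testBit sm c = true := by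
  unfold pvCond at h
  simp only [Bool.and_eq_true] at h
  simp only [Nat.testBit, Nat.and_comm]
  simpa using h.1

lemma pvChild_lt (sm c : Nat) (h : Nat.testBit sm c = true) : sm ^^^ (1 <<< c) < sm := by
  apply Nat.lt_of_testBit c
  · simp [Nat.testBit_xor, h, Nat.shiftLeft_eq]
  · exact h
  · intro j hj
    simp [Nat.testBit_xor, Nat.shiftLeft_eq, Nat.ne_of_lt hj]

lemma pvPeel_stable (masks : List Nat) (n : Nat) (t : Int) :
    ∀ sm f g, sm < f → sm < g → pvPeel masks n t f sm = pvPeel masks n t g sm := by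
  intro sm
  induction sm using Nat.strong_induction_on with
  | _ sm ih =>
    intro f g hf hg
    cases f with
    | zero => omega
    | succ f =>
      cases g with
      | zero => omega
      | succ g =>
        simp only [pvPeel]
        by_cases hs : pvSmallB t sm = true
        · simp [hs]
        · simp only [hs, if_false]
          apply List.any_congr rfl
          intro c
          by_cases hc : pvCond masks t sm c = true
          · have hlt := pvChild_lt sm c (pvCond_bit masks t sm c hc)
            rw [ih _ hlt f g (by omega) (by omega)]
          · simp [Bool.not_eq_true] at hc
            simp [hc]

lemma pvPeelN_eq (masks : List Nat) (n : Nat) (t : Int) (sm : Nat) :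
    pvPeelN masks n t sm =
      (if pvSmallB t sm then true
       else (List.range n).any fun c => pvCond masks t sm c && pvPeelN masks n t (sm ^^^ (1 <<< c))) := by
  show pvPeel masks n t (sm + 1) sm = _
  simp only [pvPeel]
  by_cases hs : pvSmallB t sm = true
  · simp [hs]
  · simp only [hs, if_false]
    apply List.any_congr rfl
    intro c
    by_cases hc : pvCond masks t sm c = true
    · have hlt := pvChild_lt sm c (pvCond_bit masks t sm c hc)
      have hst := pvPeel_stable masks n t (sm ^^^ (1 <<< c)) sm ((sm ^^^ (1 <<< c)) + 1) hlt (Nat.lt_succ_self _)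
      rw [hst]
      rfl
    · simp [Bool.not_eq_true] at hc
      simp [hc]

lemma pvPeelN_iff (masks : List Nat) (n : Nat) (t : Int) :
    ∀ sm, pvPeelN masks n t sm = true ↔
      ∃ x, pvReach masks n t sm x ∧ pvSmallB t x = true := by
  intro sm
  induction sm using Nat.strong_induction_on with
  | _ sm ih =>
    constructor
    · intro h
      rw [pvPeelN_eq] at h
      by_cases hs : pvSmallB t sm = true
      · exact ⟨sm, Relation.ReflTransGen.refl, hs⟩
      · rw [if_neg hs] at h
        simp only [List.any_eq_true] at h
        obtain ⟨c, hcr, hcc⟩ := h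
        obtain ⟨h1, h2⟩ := by simpa only [Bool.and_eq_true] using hcc
        have hlt := pvChild_lt sm c (pvCond_bit masks t sm c h1)
        obtain ⟨x, hr, hx⟩ := (ih _ hlt).mp h2
        exact ⟨x, Relation.ReflTransGen.head ⟨c, List.mem_range.mp hcr, h1, rfl⟩ hr, hx⟩
    · rintro ⟨x, hr, hx⟩
      rw [pvPeelN_eq]
      by_cases hs : pvSmallB t sm = true
      · simp [hs]
      · rcases hr.cases_head with rfl | ⟨b, hstep, hr'⟩
        · exact absurd hx (by simp [hs])
        · obtain ⟨c, hcn, hcond, rfl⟩ := hstep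
          have hlt := pvChild_lt sm c (pvCond_bit masks t sm c hcond)
          have hb : pvPeelN masks n t (sm ^^^ (1 <<< c)) = true := (ih _ hlt).mpr ⟨x, hr', hx⟩
          rw [if_neg hs]
          simp only [List.any_eq_true]
          exact ⟨c, List.mem_range.mpr hcn, by simp [hcond, hb]⟩

-- ---- A's memo dict never stores anything but the pure predicate ----

def pvGoodMemo (masks : List Nat) (n : Nat) (t : Int) (memo : PySem.Dict Nat Bool) : Prop :=
  ∀ k b, memo.get? k = some b → b = pvPeelN masks n t k

lemma pvPeelLoop_spec (masks : List Nat) (n : Nat) (t : Int) (f : Nat)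
    (hgo : ∀ sm memo, sm < f → pvGoodMemo masks n t memo →
      (pvCanPeel masks n t f sm memo).1 = pvPeelN masks n t sm ∧
      pvGoodMemo masks n t (pvCanPeel masks n t f sm memo).2) :
    ∀ cs sm memo, sm ≤ f → pvGoodMemo masks n t memo →
      pvPeelN masks n t sm = cs.any (fun c => pvCond masks t sm c && pvPeelN masks n t (sm ^^^ (1 <<< c))) →
      (pvPeelLoop masks n t f sm cs memo).1 = pvPeelN masks n t sm ∧
      pvGoodMemo masks n t (pvPeelLoop masks n t f sm cs memo).2 := by
  intro cs
  induction cs with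
  | nil =>
    intro sm memo hsm hg hany
    simp only [List.any_nil] at hany
    refine ⟨by simp [pvPeelLoop, hany], ?_⟩
    intro k b hk
    simp only [pvPeelLoop] at hk
    rw [PySem.Dict.get?_insert] at hk
    split at hk
    · next heq => cases hk; subst heq; exact hany.symm
    · exact hg _ _ hk
  | cons c cs' ih =>
    intro sm memo hsm hg hany
    by_cases hbit : (((sm >>> c) &&& 1) == 0) = true
    · have hcond : pvCond masks t sm c = false := by
        unfold pvCond
        simp only [beq_iff_eq] at hbit
        simp [hbit]
      have hany' : pvPeelN masks n t sm
          = cs'.any (fun c => pvCond masks t sm c && pvPeelN masks n t (sm ^^^ (1 <<< c))) := by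
        rw [hany]; simp [hcond]
      have := ih sm memo hsm hg hany'
      simpa only [pvPeelLoop, hbit, if_true] using this
    · have hbit1 : sm >>> c &&& 1 = 1 := by
        simp only [beq_iff_eq] at hbit
        have := Nat.and_one_is_mod (sm >>> c)
        omega
      by_cases hdeg : t ≤ (pvPop ((masks.getD c 0) &&& sm) : Int)
      · have hcond : pvCond masks t sm c = true := by
          unfold pvCond
          rw [hbit1, decide_eq_true hdeg]
          simp
        have hlt := pvChild_lt sm c (pvCond_bit masks t sm c hcond)
        obtain ⟨hr1, hr2⟩ := hgo (sm ^^^ (1 <<< c)) memo (by omega) hg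
        by_cases hres : (pvCanPeel masks n t f (sm ^^^ (1 <<< c)) memo).1 = true
        · have hPsm : pvPeelN masks n t sm = true := by
            rw [hany, List.any_cons, hcond]
            rw [hr1] at hres
            simp [hres]
          have hstep : pvPeelLoop masks n t f sm (c :: cs') memo
              = (true, (pvCanPeel masks n t f (sm ^^^ (1 <<< c)) memo).2.insert sm true) := by
            simp only [pvPeelLoop, if_neg hbit, if_pos hdeg, hres, eq_self_iff_true, if_true]
          rw [hstep]
          refine ⟨hPsm.symm, ?_⟩
          intro k b hk
          rw [PySem.Dict.get?_insert] at hk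
          split at hk
          · next heq => cases hk; subst heq; exact hPsm.symm
          · exact hr2 _ _ hk
        · have hres' : (pvCanPeel masks n t f (sm ^^^ (1 <<< c)) memo).1 = false :=
            Bool.eq_false_iff.mpr hres
          have hchild : pvPeelN masks n t (sm ^^^ (1 <<< c)) = false := by
            rw [← hr1]; exact hres'
          have hany' : pvPeelN masks n t sm
              = cs'.any (fun c => pvCond masks t sm c && pvPeelN masks n t (sm ^^^ (1 <<< c))) := by
            rw [hany, List.any_cons, hchild]
            simp
          have hstep : pvPeelLoop masks n t f sm (c :: cs') memo
              = pvPeelLoop masks n t f sm cs' (pvCanPeel masks n t f (sm ^^^ (1 <<< c)) memo).2 := by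
            simp only [pvPeelLoop, if_neg hbit, if_pos hdeg, hres', Bool.false_eq_true, if_false]
          rw [hstep]
          exact ih sm _ hsm hr2 hany'
      · have hcond : pvCond masks t sm c = false := by
          unfold pvCond
          rw [decide_eq_false hdeg]
          simp
        have hany' : pvPeelN masks n t sm
            = cs'.any (fun c => pvCond masks t sm c && pvPeelN masks n t (sm ^^^ (1 <<< c))) := by
          rw [hany]; simp [hcond]
        have := ih sm memo hsm hg hany'
        simpa only [pvPeelLoop, if_neg hbit, if_neg hdeg] using this

lemma pvCanPeel_spec (masks : List Nat) (n : Nat) (t : Int) :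
    ∀ f sm memo, sm < f → pvGoodMemo masks n t memo →
      (pvCanPeel masks n t f sm memo).1 = pvPeelN masks n t sm ∧
      pvGoodMemo masks n t (pvCanPeel masks n t f sm memo).2 := by
  intro f
  induction f with
  | zero => intro sm memo h; omega
  | succ f ih =>
    intro sm memo hsm hg
    cases hmg : memo.get? sm with
    | some b =>
      have h1 : pvCanPeel masks n t (f + 1) sm memo = (b, memo) := by
        simp only [pvCanPeel, hmg]
      rw [h1]
      exact ⟨hg _ _ hmg, hg⟩
    | none =>
      by_cases hs : (pvPop sm : Int) ≤ t
      · have h1 : pvCanPeel masks n t (f + 1) sm memo = (true, memo.insert sm true) := by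
          simp only [pvCanPeel, hmg, if_pos hs]
        rw [h1]
        have hPsm : pvPeelN masks n t sm = true := by
          rw [pvPeelN_eq]; simp [pvSmallB, hs]
        refine ⟨hPsm.symm, ?_⟩
        intro k b hk
        rw [PySem.Dict.get?_insert] at hk
        split at hk
        · next heq => cases hk; subst heq; exact hPsm.symm
        · exact hg _ _ hk
      · have hsmall : pvSmallB t sm = false := by simp [pvSmallB, hs]
        have h1 : pvCanPeel masks n t (f + 1) sm memo
            = pvPeelLoop masks n t f sm (List.range n) memo := by
          simp only [pvCanPeel, hmg, if_neg hs]
        rw [h1]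
        have hany : pvPeelN masks n t sm
            = (List.range n).any (fun c => pvCond masks t sm c && pvPeelN masks n t (sm ^^^ (1 <<< c))) := by
          rw [pvPeelN_eq]; simp [hsmall]
        exact pvPeelLoop_spec masks n t f ih (List.range n) sm memo (by omega) hg hany

-- ---- B's search ----

lemma pvLenBound (l : List Nat) (full : Nat) (hn : l.Nodup) (hb : ∀ x ∈ l, x ≤ full) :
    l.length ≤ full + 1 := by
  have hsub : l.toFinset ⊆ Finset.range (full + 1) := by
    intro x hx
    simp only [List.mem_toFinset] at hx
    exact Finset.mem_range.mpr (Nat.lt_succ_of_le (hb x hx))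
  calc l.length = l.toFinset.card := (List.toFinset_card_of_nodup hn).symm
    _ ≤ (Finset.range (full + 1)).card := Finset.card_le_card hsub
    _ = full + 1 := Finset.card_range _

lemma pvDfsStep_of_cond_false (masks : List Nat) (t : Int) (sm c : Nat)
    (st : List Nat) (se : PySem.Set Nat) (hcond : pvCond masks t sm c = false) :
    pvDfsStep masks t sm (st, se) c = (st, se) := by
  unfold pvCond at hcond
  unfold pvDfsStep
  by_cases hbit : ((((sm >>> c) &&& 1)) != 0) = true
  · rw [if_pos hbit]
    rw [hbit] at hcond
    simp only [Bool.true_and] at hcond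
    rw [if_neg (of_decide_eq_false hcond)]
  · rw [if_neg hbit]

lemma pvDfsStep_of_cond_true (masks : List Nat) (t : Int) (sm c : Nat)
    (st : List Nat) (se : PySem.Set Nat) (hcond : pvCond masks t sm c = true) :
    pvDfsStep masks t sm (st, se) c =
      (if (sm ^^^ (1 <<< c)) ∈ se then (st, se)
       else (st ++ [sm ^^^ (1 <<< c)], PySem.Set.add se (sm ^^^ (1 <<< c)))) := by
  unfold pvCond at hcond
  obtain ⟨h1, h2⟩ := by simpa only [Bool.and_eq_true] using hcond
  unfold pvDfsStep
  rw [if_pos h1, if_pos (of_decide_eq_true h2)]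

lemma pvFold_spec (masks : List Nat) (t : Int) (sm : Nat) :
    ∀ (cs : List Nat) (st : List Nat) (se : PySem.Set Nat), se.Nodup →
      (cs.foldl (pvDfsStep masks t sm) (st, se)).2.Nodup ∧
      (∀ x ∈ se, x ∈ (cs.foldl (pvDfsStep masks t sm) (st, se)).2) ∧
      (∀ x ∈ (cs.foldl (pvDfsStep masks t sm) (st, se)).2,
        x ∈ se ∨ ∃ c ∈ cs, pvCond masks t sm c = true ∧ x = sm ^^^ (1 <<< c)) ∧
      (∀ c ∈ cs, pvCond masks t sm c = true → sm ^^^ (1 <<< c) ∈ (cs.foldl (pvDfsStep masks t sm) (st, se)).2) ∧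
      (∀ x ∈ st, x ∈ (cs.foldl (pvDfsStep masks t sm) (st, se)).1) ∧
      (∀ x ∈ (cs.foldl (pvDfsStep masks t sm) (st, se)).1, x ∈ st ∨ x ∈ (cs.foldl (pvDfsStep masks t sm) (st, se)).2) ∧
      ((cs.foldl (pvDfsStep masks t sm) (st, se)).1.length + se.length
        = st.length + (cs.foldl (pvDfsStep masks t sm) (st, se)).2.length) ∧
      (∀ x ∈ (cs.foldl (pvDfsStep masks t sm) (st, se)).2, x ∈ se ∨ x ∈ (cs.foldl (pvDfsStep masks t sm) (st, se)).1) := by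
  intro cs
  induction cs with
  | nil =>
    intro st se hnd
    simp only [List.foldl_nil]
    refine ⟨hnd, fun x hx => hx, fun x hx => Or.inl hx, ?_, fun x hx => hx,
      fun x hx => Or.inl hx, by simp, fun x hx => Or.inl hx⟩
    intro c hc hcc
    simp at hc
  | cons c cs ih =>
    intro st se hnd
    simp only [List.foldl_cons]
    by_cases hcond : pvCond masks t sm c = true
    · rw [pvDfsStep_of_cond_true masks t sm c st se hcond]
      by_cases hmem : (sm ^^^ (1 <<< c)) ∈ se
      · rw [if_pos hmem]
        obtain ⟨C1, C2, C3, C4, C5, C6, C7, C8⟩ := ih st se hnd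
        refine ⟨C1, C2, ?_, ?_, C5, C6, C7, C8⟩
        · intro x hx
          exact (C3 x hx).imp_right (fun ⟨c', hc', hcc, hxx⟩ => ⟨c', List.mem_cons_of_mem _ hc', hcc, hxx⟩)
        · intro c' hc' hcc
          rcases List.mem_cons.mp hc' with rfl | hc'
          · exact C2 _ hmem
          · exact C4 c' hc' hcc
      · rw [if_neg hmem]
        have hadd : PySem.Set.add se (sm ^^^ (1 <<< c)) = se ++ [sm ^^^ (1 <<< c)] := by
          unfold PySem.Set.add
          rw [if_neg]
          intro hcontains
          exact hmem (PySem.Set.contains_iff se _ |>.mp hcontains)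
        have hnd' : (PySem.Set.add se (sm ^^^ (1 <<< c))).Nodup := PySem.Set.nodup_add se _ hnd
        obtain ⟨C1, C2, C3, C4, C5, C6, C7, C8⟩ := ih (st ++ [sm ^^^ (1 <<< c)]) (PySem.Set.add se (sm ^^^ (1 <<< c))) hnd'
        have hmemadd : (sm ^^^ (1 <<< c)) ∈ PySem.Set.add se (sm ^^^ (1 <<< c)) :=
          (PySem.Set.mem_add se _ _).mpr (Or.inr rfl)
        refine ⟨C1, ?_, ?_, ?_, ?_, ?_, ?_, ?_⟩
        · intro x hx
          exact C2 x ((PySem.Set.mem_add se _ _).mpr (Or.inl hx))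
        · intro x hx
          rcases C3 x hx with hx' | ⟨c', hc', hcc, hxx⟩
          · rcases (PySem.Set.mem_add se _ _).mp hx' with hx'' | rfl
            · exact Or.inl hx''
            · exact Or.inr ⟨c, List.mem_cons_self, hcond, rfl⟩
          · exact Or.inr ⟨c', List.mem_cons_of_mem _ hc', hcc, hxx⟩
        · intro c' hc' hcc
          rcases List.mem_cons.mp hc' with rfl | hc'
          · exact C2 _ hmemadd
          · exact C4 c' hc' hcc
        · intro x hx
          exact C5 x (List.mem_append_left _ hx)
        · intro x hx
          rcases C6 x hx with hx' | hx'
          · rcases List.mem_append.mp hx' with hx'' | hx''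
            · exact Or.inl hx''
            · have : x = sm ^^^ (1 <<< c) := by simpa using hx''
              exact Or.inr (this ▸ C2 _ hmemadd)
          · exact Or.inr hx'
        · have h1 : (PySem.Set.add se (sm ^^^ (1 <<< c))).length = se.length + 1 := by
            rw [hadd, List.length_append, List.length_singleton]
          have h2 : (st ++ [sm ^^^ (1 <<< c)]).length = st.length + 1 := by
            rw [List.length_append, List.length_singleton]
          omega
        · intro x hx
          rcases C8 x hx with hx' | hx'
          · rcases (PySem.Set.mem_add se _ _).mp hx' with hx'' | rfl
            · exact Or.inl hx''
            · exact Or.inr (C5 _ (List.mem_append_right _ (List.mem_singleton.mpr rfl)))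
          · exact Or.inr hx'
    · have hcond' : pvCond masks t sm c = false := Bool.eq_false_iff.mpr hcond
      rw [pvDfsStep_of_cond_false masks t sm c st se hcond']
      obtain ⟨C1, C2, C3, C4, C5, C6, C7, C8⟩ := ih st se hnd
      refine ⟨C1, C2, ?_, ?_, C5, C6, C7, C8⟩
      · intro x hx
        exact (C3 x hx).imp_right (fun ⟨c', hc', hcc, hxx⟩ => ⟨c', List.mem_cons_of_mem _ hc', hcc, hxx⟩)
      · intro c' hc' hcc
        rcases List.mem_cons.mp hc' with rfl | hc'
        · exact absurd hcc (by simp [hcond'])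
        · exact C4 c' hc' hcc

def pvInv (masks : List Nat) (n : Nat) (t : Int) (full : Nat)
    (stack : List Nat) (seen : PySem.Set Nat) : Prop :=
  seen.Nodup ∧ full ∈ seen ∧ (∀ x ∈ seen, x ≤ full) ∧
  (∀ x ∈ seen, pvReach masks n t full x) ∧
  (∀ x ∈ stack, x ∈ seen) ∧
  (∀ x ∈ seen, x ∉ stack →
    pvSmallB t x = false ∧ ∀ c, c < n → pvCond masks t x c = true → x ^^^ (1 <<< c) ∈ seen)

lemma pvDfs_spec (masks : List Nat) (n : Nat) (t : Int) (full : Nat) :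
    ∀ f stack seen, pvInv masks n t full stack seen →
      (full + 1 - seen.length) + stack.length < f →
      (pvDfs masks n t f stack seen = true ↔
        ∃ x, pvReach masks n t full x ∧ pvSmallB t x = true) := by
  intro f
  induction f with
  | zero => intro stack seen hinv hM; omega
  | succ f ih =>
    intro stack seen hinv hM
    obtain ⟨hnd, hfull, hbound, hreach, hss, hclos⟩ := hinv
    rcases List.eq_nil_or_concat stack with rfl | ⟨ys, sm, hconc⟩
    · have hdfs : pvDfs masks n t (f + 1) [] seen = false := by
        simp only [pvDfs]
        rfl
      rw [hdfs]
      simp only [Bool.false_eq_true, false_iff]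
      rintro ⟨x, hr, hx⟩
      have hxin : x ∈ seen := by
        clear hx
        induction hr with
        | refl => exact hfull
        | tail hab hbc ihm =>
          obtain ⟨c, hcn, hcond, rfl⟩ := hbc
          exact (hclos _ ihm (List.not_mem_nil)).2 c hcn hcond
      exact absurd hx (by simp [(hclos _ hxin (List.not_mem_nil)).1])
    · subst hconc
      rw [List.concat_eq_append] at hss hclos hM ⊢
      have hpop : PySem.List.pop? (ys ++ [sm]) = some (sm, ys) := PySem.List.pop?_last ys sm
      have hsm_seen : sm ∈ seen := hss sm (by simp)
      by_cases hsmall : (pvPop sm : Int) ≤ t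
      · have hdfs : pvDfs masks n t (f + 1) (ys ++ [sm]) seen = true := by
          simp only [pvDfs, hpop]
          rw [if_pos hsmall]
        rw [hdfs]
        simp only [true_iff]
        exact ⟨sm, hreach _ hsm_seen, by simp [pvSmallB, hsmall]⟩
      · have hdfs : pvDfs masks n t (f + 1) (ys ++ [sm]) seen
            = pvDfs masks n t f ((List.range n).foldl (pvDfsStep masks t sm) (ys, seen)).1
                ((List.range n).foldl (pvDfsStep masks t sm) (ys, seen)).2 := by
          simp only [pvDfs, hpop]
          rw [if_neg hsmall]
        obtain ⟨C1, C2, C3, C4, C5, C6, C7, C8⟩ := pvFold_spec masks t sm (List.range n) ys seen hnd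
        have hsmfalse : pvSmallB t sm = false := by simp [pvSmallB, hsmall]
        have hbound' : ∀ x ∈ ((List.range n).foldl (pvDfsStep masks t sm) (ys, seen)).2, x ≤ full := by
          intro x hx
          rcases C3 x hx with hx' | ⟨c, hcr, hcond, rfl⟩
          · exact hbound x hx'
          · have hlt := pvChild_lt sm c (pvCond_bit masks t sm c hcond)
            have := hbound sm hsm_seen
            omega
        have hnew : pvInv masks n t full ((List.range n).foldl (pvDfsStep masks t sm) (ys, seen)).1
            ((List.range n).foldl (pvDfsStep masks t sm) (ys, seen)).2 := by
          refine ⟨C1, C2 full hfull, hbound', ?_, ?_, ?_⟩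
          · intro x hx
            rcases C3 x hx with hx' | ⟨c, hcr, hcond, rfl⟩
            · exact hreach x hx'
            · exact Relation.ReflTransGen.tail (hreach sm hsm_seen) ⟨c, List.mem_range.mp hcr, hcond, rfl⟩
          · intro x hx
            rcases C6 x hx with hx' | hx'
            · exact C2 x (hss x (List.mem_append_left _ hx'))
            · exact hx'
          · intro x hx hxs
            by_cases hxseen : x ∈ seen
            · by_cases hxstack : x ∈ ys ++ [sm]
              · rcases List.mem_append.mp hxstack with hy | hy
                · exact absurd (C5 x hy) hxs
                · have hxsm : x = sm := by simpa using hy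
                  subst hxsm
                  refine ⟨hsmfalse, ?_⟩
                  intro c hcn hcond
                  exact C4 c (List.mem_range.mpr hcn) hcond
              · obtain ⟨hc1, hc2⟩ := hclos x hxseen hxstack
                exact ⟨hc1, fun c hcn hcond => C2 _ (hc2 c hcn hcond)⟩
            · rcases C8 x hx with h | h
              · exact absurd h hxseen
              · exact absurd h hxs
        have hlen_seen := pvLenBound seen full hnd hbound
        have hlen2 := pvLenBound _ full C1 hbound'
        have hM' : (full + 1 - ((List.range n).foldl (pvDfsStep masks t sm) (ys, seen)).2.length)
            + ((List.range n).foldl (pvDfsStep masks t sm) (ys, seen)).1.length < f := by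
          rw [List.length_append, List.length_singleton] at hM
          omega
        rw [hdfs]
        exact ih _ _ hnew hM' 

-- ===== VERDICT (by name: the statement is the Claim_ definition above) =====
theorem is_ear_orderable_spec : Claim_equal_is_ear_orderable := by
  intro rows threshold _hdom _hpre
  unfold Spec_is_ear_orderable
  show (pvCanPeel (rows_to_masks rows) rows.length threshold ((1 <<< rows.length - 1) + 1)
          (1 <<< rows.length - 1) PySem.Dict.empty).1
      = pvDfs (rows_to_masks rows) rows.length threshold ((1 <<< rows.length - 1) + 2)
          [1 <<< rows.length - 1] (PySem.Set.ofList [1 <<< rows.length - 1])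
  have hgood : pvGoodMemo (rows_to_masks rows) rows.length threshold PySem.Dict.empty := by
    intro k b hk
    rw [PySem.Dict.get?_empty] at hk
    cases hk
  obtain ⟨hA, -⟩ := pvCanPeel_spec (rows_to_masks rows) rows.length threshold
    ((1 <<< rows.length - 1) + 1) (1 <<< rows.length - 1) PySem.Dict.empty (by omega) hgood
  rw [hA]
  have hofl : PySem.Set.ofList [1 <<< rows.length - 1] = [1 <<< rows.length - 1] :=
    PySem.Set.ofList_eq_self_of_nodup _ (List.nodup_singleton _)
  have hinv : pvInv (rows_to_masks rows) rows.length threshold (1 <<< rows.length - 1)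
      [1 <<< rows.length - 1] (PySem.Set.ofList [1 <<< rows.length - 1]) := by
    rw [hofl]
    refine ⟨List.nodup_singleton _, by simp, by simp, ?_, fun x hx => hx, ?_⟩
    · intro x hx
      have : x = 1 <<< rows.length - 1 := by simpa using hx
      subst this
      exact Relation.ReflTransGen.refl
    · intro x hx hxs
      exact absurd hx hxs
  have hB := pvDfs_spec (rows_to_masks rows) rows.length threshold (1 <<< rows.length - 1)
    ((1 <<< rows.length - 1) + 2) [1 <<< rows.length - 1] (PySem.Set.ofList [1 <<< rows.length - 1])
    hinv (by rw [hofl]; simp)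
  have hAiff := pvPeelN_iff (rows_to_masks rows) rows.length threshold (1 <<< rows.length - 1)
  by_cases hb : pvDfs (rows_to_masks rows) rows.length threshold ((1 <<< rows.length - 1) + 2)
      [1 <<< rows.length - 1] (PySem.Set.ofList [1 <<< rows.length - 1]) = true
  · rw [hb]
    exact hAiff.mpr (hB.mp hb)
  · rw [Bool.eq_false_iff.mpr hb]
    refine Bool.eq_false_iff.mpr (fun hp => hb (hB.mpr (hAiff.mp hp)))
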